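-- pv_equiv track=rewrite | github.com/y0sh1da-available/ATBMTT_Nhom04 | MaHoaCoDien/main.py | vigenere_cipher_auto_key
-- ===== SOURCE A (Python) =====
-- def vigenere_cipher_auto_key(text, key):
--     text = text.upper()
--     key = key.upper()
--     result = []
--
--     # Sử dụng Auto-key: mỗi ký tự trong văn bản được thêm vào khóa sau mỗi bước mã hóa
--     for i in range(len(text)):
--         shift = ord(key[i % len(key)]) - ord('A')  # Dịch chuyển dựa trên ký tự trong khóa
--         encrypted_char = chr((ord(text[i]) - ord('A') + shift) % 26 + ord('A'))
--         result.append(encrypted_char)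
--
--         # Mở rộng khóa tự động bằng cách lấy ký tự mã hóa và thêm vào khóa
--         key += encrypted_char
--
--     return ''.join(result)
-- ===== SOURCE B (Python) =====
-- def vigenere_cipher_auto_key(text, key):
--     # Closed-form column pass: out[i] = key[i % k] + running sum of text[i], text[i-k], ...
--     # (mod 26); computed column-by-column with one prefix-sum per key position,
--     # never consulting previously emitted output or a growing key.
--     text = text.upper()
--     key = key.upper()
--     n = len(text)
--     out = [None] * n
--     for r in range(min(len(key), n)):
--         acc = ord(key[r]) - ord('A')
--         for j in range(r, n, len(key)):
--             acc = (acc + ord(text[j]) - ord('A')) % 26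
--             out[j] = chr(acc + ord('A'))
--     return ''.join(out)
-- ===== Notes on version B (the rewrite author's own statement) =====
-- stated objective: alternative
-- what changed: B replaces A's sequential auto-key simulation (growing key string consulted each step) by a closed form: out[i] = key[i mod k] plus the prefix sum of every k-th text char, computed column-by-column with one running accumulator per key position and no dependence on previously emitted output.
import Mathlib
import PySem

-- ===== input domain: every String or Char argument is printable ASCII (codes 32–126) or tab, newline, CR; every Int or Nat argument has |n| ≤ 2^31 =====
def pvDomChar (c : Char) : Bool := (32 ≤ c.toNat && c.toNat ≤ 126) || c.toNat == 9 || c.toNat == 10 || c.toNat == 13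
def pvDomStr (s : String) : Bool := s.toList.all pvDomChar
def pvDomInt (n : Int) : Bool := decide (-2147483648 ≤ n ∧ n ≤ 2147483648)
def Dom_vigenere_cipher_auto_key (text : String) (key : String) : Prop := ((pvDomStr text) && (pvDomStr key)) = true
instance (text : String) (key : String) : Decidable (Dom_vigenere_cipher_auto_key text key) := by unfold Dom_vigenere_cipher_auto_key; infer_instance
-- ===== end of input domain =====

-- B replaces A's sequential auto-key simulation (growing key string) by a closed
-- form computed column-by-column (one running prefix sum per key position);
-- equivalence of return values on all inputs where the Python A returns (Pre_).

-- ===== PORT A =====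
-- chr((ord(c) - ord('A') + shift) % 26 + ord('A')) with shift = ord(kc) - ord('A')
def pvEnc (c : Char) (kc : Char) : Char :=
  Char.ofNat ((PySem.Int.mod ((c.toNat : Int) - 65 + ((kc.toNat : Int) - 65)) 26) + 65).toNat

-- for i in range(len(text)): shift from key[i % len(key)]; append; key += encrypted_char
-- (Python raises ZeroDivisionError when len(key) = 0 and text ≠ '': excluded by Pre_;
--  there the port's getD default is never relied on)
def vigALoop : List Char → Nat → List Char → List Char → List Char
  | [], _, _, result => result
  | c :: rest, i, key, result =>
    let kc := key.getD (i % key.length) 'A'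
    let e := pvEnc c kc
    vigALoop rest (i + 1) (key ++ [e]) (result ++ [e])

def vigenere_cipher_auto_key (text : String) (key : String) : String :=
  String.mk (vigALoop (PySem.Chars.upper text.toList) 0 (PySem.Chars.upper key.toList) [])

-- ===== PORT B =====
-- range(r, n, k) for k ≥ 1 (the only way B's Python reaches the inner loop): r, r+k, … < n
def colIdx (n k j : Nat) : List Nat :=
  if h : j < n ∧ 0 < k then j :: colIdx n k (j + k) else []
  termination_by n - j
  decreasing_by omega

-- inner loop: acc = (acc + ord(text[j]) - ord('A')) % 26; out[j] = chr(acc + ord('A'))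
def vigBCol (t : List Char) (idxs : List Nat) (st : Int × List (Option Char)) :
    Int × List (Option Char) :=
  idxs.foldl
    (fun st j =>
      let acc := PySem.Int.mod (st.1 + ((t.getD j 'A').toNat : Int) - 65) 26
      (acc, st.2.set j (some (Char.ofNat (acc + 65).toNat)))) st

-- outer loop: for r in range(min(len(key), n)): acc = ord(key[r]) - ord('A'); inner loop
def vigBBody (t kl : List Char) : List (Option Char) :=
  (List.range (min kl.length t.length)).foldl
    (fun out r => (vigBCol t (colIdx t.length kl.length r)
      (((kl.getD r 'A').toNat : Int) - 65, out)).2)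
    (List.replicate t.length none)

-- ''.join(out): inside Pre_ every cell is filled (B's Python raises on None only when
-- key = '' and text ≠ '', which Pre_ excludes); the 'A' default is never relied on there
def vigenere_cipher_auto_key_alt (text : String) (key : String) : String :=
  String.mk ((vigBBody (PySem.Chars.upper text.toList) (PySem.Chars.upper key.toList)).map
    (fun o => o.getD 'A'))

-- ===== PRECONDITION & SPEC =====
-- A raises ZeroDivisionError (i % len(key)) when key = "" and text ≠ ""; excluded.
def Pre_vigenere_cipher_auto_key (text : String) (key : String) : Prop :=
  key ≠ "" ∨ text = ""
instance (text : String) (key : String) : Decidable (Pre_vigenere_cipher_auto_key text key) := by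
  unfold Pre_vigenere_cipher_auto_key; infer_instance

def pvWitness_vigenere_cipher_auto_key : String × String := ("HELLO", "key")

def Spec_vigenere_cipher_auto_key (text : String) (key : String) (out : String) : Prop := out = vigenere_cipher_auto_key_alt text key
instance (text : String) (key : String) (out : String) : Decidable (Spec_vigenere_cipher_auto_key text key out) := by unfold Spec_vigenere_cipher_auto_key; infer_instance

-- ===== CLAIM (what is proved, stated in full; the proofs are below) =====
def Claim_equal_vigenere_cipher_auto_key : Prop := ∀ (text : String) (key : String), Dom_vigenere_cipher_auto_key text key → Pre_vigenere_cipher_auto_key text key → Spec_vigenere_cipher_auto_key text key (vigenere_cipher_auto_key text key)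

-- ===== LEMMAS AND PROOFS =====

-- the common specification: numeric value of the i-th output char (in [0, 26))
def sOut (t kl : List Char) (i : Nat) : Int :=
  if h : 0 < kl.length ∧ kl.length ≤ i then
    PySem.Int.mod ((((t.getD i 'A').toNat : Int) - 65) + sOut t kl (i - kl.length)) 26
  else
    PySem.Int.mod ((((t.getD i 'A').toNat : Int) - 65) + (((kl.getD i 'A').toNat : Int) - 65)) 26
  termination_by i
  decreasing_by omega

def cOut (t kl : List Char) (i : Nat) : Char := Char.ofNat ((sOut t kl i) + 65).toNat

theorem sOut_bounds (t kl : List Char) (i : Nat) : 0 ≤ sOut t kl i ∧ sOut t kl i < 26 := by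
  rw [sOut]
  split <;>
  · rw [PySem.Int.mod_eq_emod_of_pos (by norm_num)]
    exact ⟨Int.emod_nonneg _ (by norm_num), Int.emod_lt_of_pos _ (by norm_num)⟩

theorem char_ofNat_toNat (n : Nat) (h : n < 55296) : (Char.ofNat n).toNat = n := by
  unfold Char.ofNat
  rw [dif_pos (Or.inl h)]
  simp [Char.ofNatAux, Char.toNat]

theorem cOut_toNat (t kl : List Char) (i : Nat) :
    ((cOut t kl i).toNat : Int) = sOut t kl i + 65 := by
  obtain ⟨h0, h1⟩ := sOut_bounds t kl i
  unfold cOut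
  rw [char_ofNat_toNat _ (by omega)]
  omega

theorem pvEnc_cOut (t kl : List Char) (k i : Nat) (hk : kl.length = k) (hk0 : 0 < k) :
    pvEnc (t.getD i 'A') (if i < k then kl.getD i 'A' else cOut t kl (i - k)) = cOut t kl i := by
  by_cases h : i < k
  · simp only [h, if_pos]
    unfold pvEnc cOut
    rw [sOut]
    rw [dif_neg (by omega)]
  · simp only [h, if_neg, not_false_iff]
    unfold pvEnc
    rw [cOut_toNat]
    unfold cOut
    conv_rhs => rw [sOut]
    rw [dif_pos (by omega), hk]
    have : ((t.getD i 'A').toNat : Int) - 65 + (sOut t kl (i - k) + 65 - 65)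
        = ((t.getD i 'A').toNat : Int) - 65 + sOut t kl (i - k) := by ring
    rw [this]

-- ===== A-side: vigALoop produces (range n).map cOut =====
theorem vigALoop_spec (t kl : List Char) (hk : kl ≠ []) :
    ∀ fuel m, t.length - m = fuel → m ≤ t.length →
      vigALoop (t.drop m) m (kl ++ (List.range m).map (cOut t kl))
        ((List.range m).map (cOut t kl))
      = (List.range t.length).map (cOut t kl) := by
  intro fuel
  induction fuel with
  | zero =>
    intro m hfm hm
    have : m = t.length := by omega
    subst this
    simp [vigALoop]
  | succ f ih =>
    intro m hfm hm
    have hmlt : m < t.length := by omega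
    have hdrop : t.drop m = t[m] :: t.drop (m + 1) := List.drop_eq_getElem_cons hmlt
    have hkl : 0 < kl.length := List.length_pos_iff.mpr hk
    rw [hdrop]
    simp only [vigALoop]
    have hlen : ((List.range m).map (cOut t kl)).length = m := by simp
    have hmod : m % (kl ++ (List.range m).map (cOut t kl)).length = m := by
      rw [List.length_append, hlen]; exact Nat.mod_eq_of_lt (by omega)
    have hkc : (kl ++ (List.range m).map (cOut t kl)).getD
        (m % (kl ++ (List.range m).map (cOut t kl)).length) 'A'
        = if m < kl.length then kl.getD m 'A' else cOut t kl (m - kl.length) := by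
      rw [hmod]
      by_cases h : m < kl.length
      · simp [h, List.getD, List.getElem?_append_left h]
      · have h' : kl.length ≤ m := by omega
        simp [h, List.getD, List.getElem?_append_right h', Nat.sub_lt_iff_lt_add h', hmlt]
        rw [List.getElem?_eq_getElem (by simp; omega)]
        simp
    have he : pvEnc t[m] (if m < kl.length then kl.getD m 'A' else cOut t kl (m - kl.length))
        = cOut t kl m := by
      have : t[m] = t.getD m 'A' := by simp [List.getD, List.getElem?_eq_getElem hmlt]
      rw [this]
      exact pvEnc_cOut t kl kl.length m rfl hkl
    rw [hkc, he]
    have hm1 : (List.range m).map (cOut t kl) ++ [cOut t kl m]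
        = (List.range (m + 1)).map (cOut t kl) := by
      rw [List.range_succ]; simp
    rw [List.append_assoc, hm1]
    exact ih (m + 1) (by omega) (by omega)

-- ===== B-side =====
-- the inner fold when the column start is past the end: nothing changes
theorem vigBCol_nil (t kl : List Char) (j : Nat) (out : List (Option Char))
    (hj : t.length ≤ j) (hlen : out.length = t.length) (init : Int) :
    (let st := vigBCol t (colIdx t.length kl.length j) (init, out)
     st.2.length = t.length ∧
     ∀ i, i < t.length →
       st.2.getD i none = if j ≤ i ∧ kl.length ∣ (i - j) then some (cOut t kl i)
                          else out.getD i none) := by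
  have hjn : ¬ (j < t.length ∧ 0 < kl.length) := by omega
  rw [colIdx, dif_neg hjn]
  refine ⟨hlen, ?_⟩
  intro i hi
  have : ¬ (j ≤ i ∧ kl.length ∣ (i - j)) := by
    rintro ⟨h1, _⟩; omega
  simp [vigBCol, this]

-- the inner fold: sets exactly the column's positions to cOut, threading sOut as acc
theorem vigBCol_spec (t kl : List Char) (hk : 0 < kl.length) :
    ∀ fuel j out, t.length - j ≤ fuel → out.length = t.length →
      (let st := vigBCol t (colIdx t.length kl.length j)
        ((if j < kl.length then ((kl.getD j 'A').toNat : Int) - 65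
          else sOut t kl (j - kl.length)), out)
       st.2.length = t.length ∧
       ∀ i, i < t.length →
         st.2.getD i none = if j ≤ i ∧ kl.length ∣ (i - j) then some (cOut t kl i)
                            else out.getD i none) := by
  intro fuel
  induction fuel with
  | zero =>
    intro j out hfj hlen
    exact vigBCol_nil t kl j out (by omega) hlen _
  | succ f ih =>
    intro j out hfj hlen
    by_cases hjn : j < t.length
    · rw [colIdx, dif_pos ⟨hjn, hk⟩]
      simp only [vigBCol, List.foldl_cons]
      -- the acc computed at index j equals sOut t kl j
      have hacc : PySem.Int.mod
          ((if j < kl.length then ((kl.getD j 'A').toNat : Int) - 65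
            else sOut t kl (j - kl.length)) + ((t.getD j 'A').toNat : Int) - 65) 26
          = sOut t kl j := by
        conv_rhs => rw [sOut]
        by_cases h : j < kl.length
        · rw [if_pos h, dif_neg (by omega)]
          congr 1
          ring
        · rw [if_neg h, dif_pos (by omega)]
          congr 1
          ring
      rw [hacc]
      have hout' : (out.set j (some (Char.ofNat ((sOut t kl j) + 65).toNat))).length
          = t.length := by simp [hlen]
      have hnext : (if j + kl.length < kl.length
            then ((kl.getD (j + kl.length) 'A').toNat : Int) - 65
            else sOut t kl (j + kl.length - kl.length))
          = sOut t kl j := by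
        rw [if_neg (by omega)]
        congr 1
        omega
      have := ih (j + kl.length)
        (out.set j (some (Char.ofNat ((sOut t kl j) + 65).toNat)))
        (by omega) hout'
      rw [hnext] at this
      simp only [vigBCol] at this ⊢
      obtain ⟨hL, hP⟩ := this
      refine ⟨hL, ?_⟩
      intro i hi
      rw [hP i hi]
      by_cases hc : j ≤ i ∧ kl.length ∣ (i - j)
      · obtain ⟨h1, c, hc2⟩ := hc
        rcases Nat.eq_zero_or_pos c with rfl | hc0
        · -- i = j: the cell just set
          have hij : i = j := by omega
          subst hij
          have : ¬ (i + kl.length ≤ i ∧ kl.length ∣ (i - (i + kl.length))) := by omega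
          rw [if_neg this, if_pos ⟨h1, ⟨0, by omega⟩⟩]
          have hcO : cOut t kl i = Char.ofNat ((sOut t kl i) + 65).toNat := rfl
          rw [hcO]
          simp [List.getD, List.getElem?_set, hlen, hjn]
        · have h1' : j + kl.length ≤ i := by
            have hkc : kl.length * 1 ≤ kl.length * c := Nat.mul_le_mul_left _ hc0
            rw [Nat.mul_one] at hkc
            omega
          have h2' : kl.length ∣ (i - (j + kl.length)) := ⟨c - 1, by
            have hms : kl.length * (c - 1) = kl.length * c - kl.length * 1 :=
              Nat.mul_sub kl.length c 1
            rw [Nat.mul_one] at hms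
            omega⟩
          rw [if_pos ⟨h1', h2'⟩, if_pos ⟨h1, ⟨c, hc2⟩⟩]
      · have : ¬ (j + kl.length ≤ i ∧ kl.length ∣ (i - (j + kl.length))) := by
          rintro ⟨h1, c, hc2⟩
          apply hc
          refine ⟨by omega, c + 1, ?_⟩
          rw [Nat.mul_add, Nat.mul_one]
          omega
        rw [if_neg this, if_neg hc]
        have hne : j ≠ i := by
          intro hij; exact hc ⟨by omega, by simp [hij]⟩
        simp [List.getD, List.getElem?_set_ne hne]
    · exact vigBCol_nil t kl j out (by omega) hlen _

-- the outer fold: after columns r..r+fuel-1 (fuel = min k n - r), every cell is filled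
theorem vigBBody_inv (t kl : List Char) (hk : 0 < kl.length) :
    ∀ fuel r out, min kl.length t.length - r = fuel → r ≤ min kl.length t.length →
      out.length = t.length →
      (∀ i, i < t.length →
        out.getD i none = if i % kl.length < r then some (cOut t kl i) else none) →
      (let res := (List.range' r fuel).foldl
        (fun out r => (vigBCol t (colIdx t.length kl.length r)
          (((kl.getD r 'A').toNat : Int) - 65, out)).2) out
       res.length = t.length ∧
       ∀ i, i < t.length →
         res.getD i none = if i % kl.length < min kl.length t.length
                           then some (cOut t kl i) else none) := by
  intro fuel
  induction fuel with
  | zero =>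
    intro r out hfr hrm hlen hinv
    have : r = min kl.length t.length := by omega
    subst this
    refine ⟨hlen, ?_⟩
    intro i hi
    exact hinv i hi
  | succ f ih =>
    intro r out hfr hrm hlen hinv
    have hrlt : r < min kl.length t.length := by omega
    rw [List.range'_succ]
    simp only [List.foldl_cons]
    have hrk : r < kl.length := by omega
    have hstep := vigBCol_spec t kl hk t.length r out (by omega) hlen
    rw [if_pos hrk] at hstep
    obtain ⟨hL, hP⟩ := hstep
    have hinv' : ∀ i, i < t.length →
        ((vigBCol t (colIdx t.length kl.length r)
          (((kl.getD r 'A').toNat : Int) - 65, out)).2).getD i none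
        = if i % kl.length < r + 1 then some (cOut t kl i) else none := by
      intro i hi
      rw [hP i hi]
      by_cases hc : r ≤ i ∧ kl.length ∣ (i - r)
      · have him : i % kl.length = r := by
          obtain ⟨h1, c, hc2⟩ := hc
          have hieq : i = kl.length * c + r := by omega
          rw [hieq, Nat.mul_add_mod]
          exact Nat.mod_eq_of_lt hrk
        rw [if_pos hc, if_pos (by omega)]
      · rw [if_neg hc, hinv i hi]
        by_cases hlt : i % kl.length < r
        · rw [if_pos hlt, if_pos (by omega)]
        · rw [if_neg hlt, if_neg (by
            intro h
            have him : i % kl.length = r := by omega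
            apply hc
            constructor
            · have := Nat.mod_le i kl.length; omega
            · have hieq : i = kl.length * (i / kl.length) + r := by
                conv_lhs => rw [← Nat.div_add_mod i kl.length, him]
              exact ⟨i / kl.length, by omega⟩)]
    exact ih (r + 1) _ (by omega) (by omega) hL hinv'

theorem vigBBody_spec (t kl : List Char) (hk : kl ≠ []) :
    vigBBody t kl = (List.range t.length).map (fun i => some (cOut t kl i)) := by
  have hk0 : 0 < kl.length := List.length_pos_iff.mpr hk
  have hrange : List.range (min kl.length t.length)
      = List.range' 0 (min kl.length t.length) := List.range_eq_range'
  unfold vigBBody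
  rw [hrange]
  have := vigBBody_inv t kl hk0 (min kl.length t.length) 0 (List.replicate t.length none)
    (by omega) (by omega) (by simp)
    (by intro i hi; simp [List.getD, List.getElem?_replicate, hi])
  obtain ⟨hL, hP⟩ := this
  simp only [List.getD] at hL hP ⊢
  apply List.ext_getElem (by simp [hL])
  intro i h1 h2
  have hi : i < t.length := by simpa using h2
  have hmod : i % kl.length < min kl.length t.length := by
    have h := Nat.mod_lt i hk0
    have h2 := Nat.mod_le i kl.length
    omega
  have h3 := hP i hi
  rw [if_pos hmod] at h3
  rw [List.getElem?_eq_getElem h1] at h3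
  simp only [Option.getD_some] at h3
  simp [h3]

-- ===== VERDICT (by name: the statement is the Claim_ definition above) =====
theorem vigenere_cipher_auto_key_spec : Claim_equal_vigenere_cipher_auto_key := by
  intro text key _ hpre
  unfold Spec_vigenere_cipher_auto_key vigenere_cipher_auto_key vigenere_cipher_auto_key_alt
  rcases hpre with hkey | ht
  · set t := PySem.Chars.upper text.toList
    set kl := PySem.Chars.upper key.toList
    have hk : kl ≠ [] := by
      simp [kl, PySem.Chars.upper]
      intro h
      exact hkey (by cases key; simp_all)
    have hA := vigALoop_spec t kl hk (t.length - 0) 0 rfl (by omega)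
    simp only [List.drop_zero, List.range_zero, List.map_nil, List.append_nil] at hA
    rw [hA, vigBBody_spec t kl hk]
    congr 1
    simp [Function.comp]
  · subst ht
    simp [PySem.Chars.upper, vigALoop, vigBBody]
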